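-- pv_equiv track=rewrite | github.com/Ancienttwo/xiaohongshu-skill | dist/openclaw/scripts/workspace_parsing.py | extract_keyword_map
-- ===== SOURCE A (Python) =====
-- def extract_keyword_map(analysis_markdown: str) -> dict[str, list[str]]:
--     result = {"core": [], "long_tail": [], "trigger": []}
--     current = None
--     for line in analysis_markdown.splitlines():
--         stripped = line.strip()
--         if stripped == "### Core Keywords":
--             current = "core"
--             continue
--         if stripped == "### Long-tail Keywords":
--             current = "long_tail"
--             continue
--         if stripped == "### Trigger Keywords":
--             current = "trigger"
--             continue
--         if stripped.startswith("#"):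
--             current = None
--             continue
--         if current and stripped.startswith("- "):
--             value = stripped[2:].strip()
--             if value and value.upper() != "TODO":
--                 result[current].append(value)
--     return result
-- ===== SOURCE B (Python) =====
-- _SECTIONS = {
--     "### Core Keywords": "core",
--     "### Long-tail Keywords": "long_tail",
--     "### Trigger Keywords": "trigger",
-- }
--
--
-- def extract_keyword_map(analysis_markdown: str) -> dict[str, list[str]]:
--     # Phase 1: group lines into blocks, each headed by a '#...' line;
--     # lines before the first header form a discarded leading block.
--     blocks = []
--     body = []  # leading (headerless) block, discarded
--     for line in analysis_markdown.splitlines():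
--         if line.strip().startswith("#"):
--             body = []
--             blocks.append((line, body))
--         else:
--             body.append(line)
--     # Phase 2: collect bullets from recognized sections.
--     result = {"core": [], "long_tail": [], "trigger": []}
--     for header, lines in blocks:
--         key = _SECTIONS.get(header.strip())
--         if key is None:
--             continue
--         for line in lines:
--             stripped = line.strip()
--             if stripped.startswith("- "):
--                 value = stripped[2:].strip()
--                 if value and value.upper() != "TODO":
--                     result[key].append(value)
--     return result
-- ===== Notes on version B (the rewrite author's own statement) =====
-- stated objective: alternative
-- what changed: Replaces A's single-pass section state machine with a two-phase decomposition: first group the lines into header-led blocks, then collect bullet values per block via a header-to-section lookup table.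
import Mathlib
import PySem

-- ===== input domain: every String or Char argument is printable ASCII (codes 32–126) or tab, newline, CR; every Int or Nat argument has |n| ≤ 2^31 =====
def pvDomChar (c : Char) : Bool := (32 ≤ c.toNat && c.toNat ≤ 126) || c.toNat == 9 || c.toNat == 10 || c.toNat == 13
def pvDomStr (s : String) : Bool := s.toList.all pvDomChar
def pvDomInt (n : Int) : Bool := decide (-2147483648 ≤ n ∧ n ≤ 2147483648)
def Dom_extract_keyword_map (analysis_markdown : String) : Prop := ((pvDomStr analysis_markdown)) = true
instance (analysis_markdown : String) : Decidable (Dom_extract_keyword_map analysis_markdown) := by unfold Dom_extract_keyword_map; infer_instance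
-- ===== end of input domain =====

-- B replaces A's single-pass state machine by a two-phase decomposition (group lines into
-- header-led blocks, then collect bullets per recognized block via a header→section table);
-- objective: alternative (same cost, different decomposition).

-- ===== PORT A =====
-- one loop iteration of A: state = (current, result dict)
def akmStepA (st : Option String × PySem.Dict String (List String)) (line : String) :
    Option String × PySem.Dict String (List String) :=
  let stripped := PySem.Str.strip line
  if stripped = "### Core Keywords" then (some "core", st.2)
  else if stripped = "### Long-tail Keywords" then (some "long_tail", st.2)
  else if stripped = "### Trigger Keywords" then (some "trigger", st.2)
  else if PySem.Str.startswith stripped "#" then (none, st.2)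
  else
    match st.1 with
    | none => st
    | some cur =>
      if PySem.Str.startswith stripped "- " then
        let value := PySem.Str.strip (PySem.Str.slice stripped (some 2) none)
        if value ≠ "" ∧ PySem.Str.upper value ≠ "TODO" then
          (st.1, st.2.modify cur [] (fun xs => xs ++ [value]))
        else st
      else st

def extract_keyword_map (analysis_markdown : String) : List (String × List String) :=
  (((PySem.Str.splitlines analysis_markdown).foldl akmStepA
      (none, PySem.Dict.ofList [("core", []), ("long_tail", []), ("trigger", [])])).2).items

-- ===== PORT B =====
-- header → section-key table (_SECTIONS in Source B)
def akmSections : PySem.Dict String String :=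
  PySem.Dict.ofList
    [("### Core Keywords", "core"),
     ("### Long-tail Keywords", "long_tail"),
     ("### Trigger Keywords", "trigger")]

-- phase 1 of Source B: group lines into (leading headerless block, list of (header, body) blocks)
def akmGroup : List String → List String × List (String × List String)
  | [] => ([], [])
  | l :: ls =>
    let r := akmGroup ls
    if PySem.Str.startswith (PySem.Str.strip l) "#" then ([], (l, r.1) :: r.2)
    else (l :: r.1, r.2)

-- inner bullet-collecting step of Source B's phase 2
def akmCollectStep (key : String) (d : PySem.Dict String (List String)) (line : String) :
    PySem.Dict String (List String) :=
  let stripped := PySem.Str.strip line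
  if PySem.Str.startswith stripped "- " then
    let value := PySem.Str.strip (PySem.Str.slice stripped (some 2) none)
    if value ≠ "" ∧ PySem.Str.upper value ≠ "TODO" then
      d.modify key [] (fun xs => xs ++ [value])
    else d
  else d

-- one block of Source B's phase 2 (continue on an unrecognized header)
def akmProcBlock (d : PySem.Dict String (List String)) (b : String × List String) :
    PySem.Dict String (List String) :=
  match akmSections.get? (PySem.Str.strip b.1) with
  | none => d
  | some key => b.2.foldl (akmCollectStep key) d

def extract_keyword_map_alt (analysis_markdown : String) : List (String × List String) :=
  let blocks := (akmGroup (PySem.Str.splitlines analysis_markdown)).2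
  (blocks.foldl akmProcBlock
      (PySem.Dict.ofList [("core", []), ("long_tail", []), ("trigger", [])])).items

-- ===== PRECONDITION & SPEC =====
def Spec_extract_keyword_map (analysis_markdown : String) (out : List (String × List String)) : Prop := out = extract_keyword_map_alt analysis_markdown
instance (analysis_markdown : String) (out : List (String × List String)) : Decidable (Spec_extract_keyword_map analysis_markdown out) := by unfold Spec_extract_keyword_map; infer_instance

-- ===== CLAIM (what is proved, stated in full; the proofs are below) =====
def Claim_equal_extract_keyword_map : Prop := ∀ (analysis_markdown : String), Dom_extract_keyword_map analysis_markdown → Spec_extract_keyword_map analysis_markdown (extract_keyword_map analysis_markdown)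

-- ===== LEMMAS AND PROOFS =====

-- effect of one non-header line on the result dict, given the current section
def akmBodyStep (cur? : Option String) (d : PySem.Dict String (List String)) (line : String) :
    PySem.Dict String (List String) :=
  match cur? with
  | none => d
  | some k => akmCollectStep k d line

-- effect of a run of non-header lines on the result dict
def akmBody (cur? : Option String) (d : PySem.Dict String (List String)) (lines : List String) :
    PySem.Dict String (List String) :=
  match cur? with
  | none => d
  | some k => lines.foldl (akmCollectStep k) d

lemma akmBody_nil (cur? : Option String) (d : PySem.Dict String (List String)) :
    akmBody cur? d [] = d := by cases cur? <;> rfl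

lemma akmBody_cons (cur? : Option String) (d : PySem.Dict String (List String)) (l : String)
    (ls : List String) : akmBody cur? d (l :: ls) = akmBody cur? (akmBodyStep cur? d l) ls := by
  cases cur? <;> rfl

lemma akmStepA_nonheader (cur? : Option String) (d : PySem.Dict String (List String)) (l : String)
    (hH : PySem.Str.startswith (PySem.Str.strip l) "#" = false) :
    akmStepA (cur?, d) l = (cur?, akmBodyStep cur? d l) := by
  have h1 : PySem.Str.strip l ≠ "### Core Keywords" := by
    intro h; rw [h] at hH; exact absurd hH (by decide)
  have h2 : PySem.Str.strip l ≠ "### Long-tail Keywords" := by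
    intro h; rw [h] at hH; exact absurd hH (by decide)
  have h3 : PySem.Str.strip l ≠ "### Trigger Keywords" := by
    intro h; rw [h] at hH; exact absurd hH (by decide)
  have hHc : PySem.Chars.startswith (PySem.Chars.strip l.toList) ['#'] = false := by
    simpa using hH
  cases cur? with
  | none => simp [akmStepA, akmBodyStep, h1, h2, h3, hHc]
  | some k =>
    simp [akmStepA, akmBodyStep, akmCollectStep, h1, h2, h3, hHc]
    split_ifs <;> rfl

lemma akmSections_get?_none (s : String)
    (h1 : s ≠ "### Core Keywords") (h2 : s ≠ "### Long-tail Keywords")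
    (h3 : s ≠ "### Trigger Keywords") : akmSections.get? s = none := by
  have e : akmSections = PySem.Dict.mk
      [("### Core Keywords", "core"), ("### Long-tail Keywords", "long_tail"),
       ("### Trigger Keywords", "trigger")] := by rfl
  rw [e]
  simp [Ne.symm h1, Ne.symm h2, Ne.symm h3, PySem.Dict.get?]

lemma akm_main (lines : List String) : ∀ (cur? : Option String)
    (d : PySem.Dict String (List String)),
    (lines.foldl akmStepA (cur?, d)).2 =
      ((akmGroup lines).2).foldl akmProcBlock (akmBody cur? d (akmGroup lines).1) := by
  induction lines with
  | nil => intro cur? d; simp [akmGroup, akmBody_nil]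
  | cons l ls ih =>
    intro cur? d
    by_cases hH : PySem.Str.startswith (PySem.Str.strip l) "#" = true
    · -- header line
      have hg : akmGroup (l :: ls) = ([], (l, (akmGroup ls).1) :: (akmGroup ls).2) := by
        simp only [akmGroup, hH, if_true]
      by_cases h1 : PySem.Str.strip l = "### Core Keywords"
      · have hstep : akmStepA (cur?, d) l = (some "core", d) := by simp [akmStepA, h1]
        have hget : akmSections.get? (PySem.Str.strip l) = some "core" := by rw [h1]; rfl
        simp only [hg, List.foldl_cons, hstep]
        rw [ih, akmBody_nil]
        simp only [akmProcBlock, hget, akmBody]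
      · by_cases h2 : PySem.Str.strip l = "### Long-tail Keywords"
        · have hstep : akmStepA (cur?, d) l = (some "long_tail", d) := by
            simp [akmStepA, h2]
          have hget : akmSections.get? (PySem.Str.strip l) = some "long_tail" := by rw [h2]; rfl
          simp only [hg, List.foldl_cons, hstep]
          rw [ih, akmBody_nil]
          simp only [akmProcBlock, hget, akmBody]
        · by_cases h3 : PySem.Str.strip l = "### Trigger Keywords"
          · have hstep : akmStepA (cur?, d) l = (some "trigger", d) := by
              simp [akmStepA, h3]
            have hget : akmSections.get? (PySem.Str.strip l) = some "trigger" := by rw [h3]; rfl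
            simp only [hg, List.foldl_cons, hstep]
            rw [ih, akmBody_nil]
            simp only [akmProcBlock, hget, akmBody]
          · have hstep : akmStepA (cur?, d) l = (none, d) := by
              have hHc : PySem.Chars.startswith (PySem.Chars.strip l.toList) ['#'] = true := by
                simpa using hH
              cases cur? with
              | none => simp [akmStepA, h1, h2, h3, hHc]
              | some k => simp [akmStepA, h1, h2, h3, hHc]
            have hget : akmSections.get? (PySem.Str.strip l) = none :=
              akmSections_get?_none _ h1 h2 h3
            simp only [hg, List.foldl_cons, hstep]
            rw [ih, akmBody_nil]
            simp only [akmProcBlock, hget, akmBody]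
    · -- non-header line
      have hH' : PySem.Str.startswith (PySem.Str.strip l) "#" = false := by
        simp only [Bool.not_eq_true] at hH; exact hH
      have hg : akmGroup (l :: ls) = (l :: (akmGroup ls).1, (akmGroup ls).2) := by
        simp only [akmGroup, hH', if_false, Bool.false_eq_true]
      simp only [hg, List.foldl_cons, akmStepA_nonheader cur? d l hH', ih, akmBody_cons]

-- ===== VERDICT (by name: the statement is the Claim_ definition above) =====
theorem extract_keyword_map_spec : Claim_equal_extract_keyword_map := by
  intro md _
  show extract_keyword_map md = extract_keyword_map_alt md
  unfold extract_keyword_map extract_keyword_map_alt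
  rw [akm_main]
  rfl
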